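-- pv_equiv track=rewrite | github.com/MartijnBlom17/advent_of_code_2024 | advent_of_code/day_2/puzzle_1/solution.py | subtract_and_check
-- ===== SOURCE A (Python) =====
-- from typing import List
--
-- def subtract_and_check(single_list: List[int]) -> int:
--     """Subtract each consecutive digit in the list and check the result."""
--     check_sign = single_list[0] - single_list[1] > 0
--     for i in range(len(single_list) - 1):
--         if (single_list[i] - single_list[i + 1] > 0) != check_sign:
--             return False
--         if (abs(single_list[i] - single_list[i + 1]) < 1) or (abs(single_list[i] - single_list[i + 1]) > 3):
--             return False
--     return True
-- ===== SOURCE B (Python) =====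
-- from typing import List
--
-- def subtract_and_check(single_list: List[int]) -> int:
--     diffs = [a - b for a, b in zip(single_list, single_list[1:])]
--     return all(1 <= d <= 3 for d in diffs) or all(-3 <= d <= -1 for d in diffs)
-- ===== Notes on version B (the rewrite author's own statement) =====
-- stated objective: simpler
-- what changed: B materializes the list of consecutive differences once and returns (every difference between 1 and 3) OR (every difference between -3 and -1), replacing A's index loop that compares each step's sign against the first step's sign and bounds its absolute value.
import Mathlib
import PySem

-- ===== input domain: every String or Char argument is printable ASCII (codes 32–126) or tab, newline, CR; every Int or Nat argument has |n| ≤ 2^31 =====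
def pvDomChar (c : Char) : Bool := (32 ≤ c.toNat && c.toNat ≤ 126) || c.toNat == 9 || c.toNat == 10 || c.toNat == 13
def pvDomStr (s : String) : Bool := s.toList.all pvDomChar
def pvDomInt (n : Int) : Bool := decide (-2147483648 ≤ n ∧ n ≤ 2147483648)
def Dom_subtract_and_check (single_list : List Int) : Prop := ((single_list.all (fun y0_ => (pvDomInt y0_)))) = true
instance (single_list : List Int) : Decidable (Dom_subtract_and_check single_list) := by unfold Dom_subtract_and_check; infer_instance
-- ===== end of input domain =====

-- B replaces A's single reference-sign pass with two independent range checks over the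
-- materialized list of consecutive differences, combined by or (objective: simpler).

-- ===== PORT A =====
-- the for-loop over range(len(single_list)-1) with its two early 'return False' branches
def pvALoop (xs : List Int) (cs : Bool) : List Int → Bool
  | [] => true
  | i :: rest =>
      let d := (PySem.List.pyGet? xs i).getD 0 - (PySem.List.pyGet? xs (i + 1)).getD 0
      if (decide (d > 0)) != cs then false
      else if |d| < 1 ∨ |d| > 3 then false
      else pvALoop xs cs rest

def subtract_and_check (single_list : List Int) : Bool :=
  let check_sign :=
    decide ((PySem.List.pyGet? single_list 0).getD 0 - (PySem.List.pyGet? single_list 1).getD 0 > 0)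
  pvALoop single_list check_sign (PySem.List.pyRange 0 ((single_list.length : Int) - 1) 1)

-- ===== PORT B =====
def subtract_and_check_alt (single_list : List Int) : Bool :=
  let diffs := (single_list.zip (PySem.List.slice single_list (some 1) none)).map (fun p => p.1 - p.2)
  diffs.all (fun d => decide (1 ≤ d ∧ d ≤ 3)) || diffs.all (fun d => decide (-3 ≤ d ∧ d ≤ -1))

-- ===== PRECONDITION & SPEC =====
-- A unconditionally reads the second element, so it raises IndexError on lists of length < 2;
-- Pre_ excludes exactly those inputs (B itself returns true there, vacuously).
def Pre_subtract_and_check (single_list : List Int) : Prop := 2 ≤ single_list.length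
instance (single_list : List Int) : Decidable (Pre_subtract_and_check single_list) := by
  unfold Pre_subtract_and_check; infer_instance
def pvWitness_subtract_and_check : List Int := [5, 4, 2]

def Spec_subtract_and_check (single_list : List Int) (out : Bool) : Prop := out = subtract_and_check_alt single_list
instance (single_list : List Int) (out : Bool) : Decidable (Spec_subtract_and_check single_list out) := by unfold Spec_subtract_and_check; infer_instance

-- ===== CLAIM (what is proved, stated in full; the proofs are below) =====
def Claim_equal_subtract_and_check : Prop := ∀ (single_list : List Int), Dom_subtract_and_check single_list → Pre_subtract_and_check single_list → Spec_subtract_and_check single_list (subtract_and_check single_list)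

-- ===== LEMMAS AND PROOFS =====

def pvDiffs (xs : List Int) : List Int := (xs.zip xs.tail).map (fun p => p.1 - p.2)

def pvStep (cs : Bool) (d : Int) : Bool :=
  if (decide (d > 0)) != cs then false
  else if |d| < 1 ∨ |d| > 3 then false
  else true

lemma pvALoop_all (xs : List Int) (cs : Bool) :
    ∀ idxs : List Int,
      pvALoop xs cs idxs =
        idxs.all (fun i =>
          pvStep cs ((PySem.List.pyGet? xs i).getD 0 - (PySem.List.pyGet? xs (i + 1)).getD 0))
  | [] => rfl
  | i :: rest => by
    have ih := pvALoop_all xs cs rest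
    simp only [pvALoop, List.all_cons, ih, pvStep]
    split_ifs <;> simp

lemma pvRange_all_diffs (p : Int → Bool) :
    ∀ xs : List Int,
      (List.range (xs.length - 1)).all
          (fun k => p ((xs[k]?).getD 0 - (xs[k + 1]?).getD 0))
        = (pvDiffs xs).all p
  | [] => rfl
  | [_] => rfl
  | a :: b :: t => by
    have ih := pvRange_all_diffs p (b :: t)
    have hd : pvDiffs (a :: b :: t) = (a - b) :: pvDiffs (b :: t) := rfl
    have hlen : (a :: b :: t).length - 1 = t.length + 1 := by simp
    have hlen2 : (b :: t).length - 1 = t.length := by simp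
    rw [hlen, hd, List.range_succ_eq_map, List.all_cons, List.all_map, List.all_cons]
    simp only [Function.comp_def, List.getElem?_cons_succ, List.getElem?_cons_zero,
      Option.getD_some]
    simp only [List.getElem?_cons_succ] at ih
    rw [hlen2] at ih
    rw [ih]

lemma pvStep_pos (d : Int) :
    pvStep true d = decide (1 ≤ d ∧ d ≤ 3) := by
  rcases abs_cases d with ⟨h, h0⟩ | ⟨h, h0⟩ <;>
    · rw [pvStep, h]
      split_ifs with h1 h2 <;> simp_all <;> omega

lemma pvStep_neg (d : Int) :
    pvStep false d = decide (-3 ≤ d ∧ d ≤ -1) := by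
  rcases abs_cases d with ⟨h, h0⟩ | ⟨h, h0⟩ <;>
    · rw [pvStep, h]
      split_ifs with h1 h2 <;> simp_all <;> omega

lemma pv_main (a b : Int) (t : List Int) :
    subtract_and_check (a :: b :: t) = subtract_and_check_alt (a :: b :: t) := by
  simp only [subtract_and_check, subtract_and_check_alt, PySem.List.slice_from_one]
  have hr : PySem.List.pyRange 0 (((a :: b :: t).length : Int) - 1) 1
      = (List.range ((a :: b :: t).length - 1)).map (fun k : Nat => (k : Int)) := by
    rw [PySem.List.pyRange_one]
    have : ((((a :: b :: t).length : Int) - 1) - 0).toNat = (a :: b :: t).length - 1 := by simp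
    rw [this]
    simp
  rw [hr, pvALoop_all, List.all_map]
  simp only [Function.comp_def]
  have hcs : decide ((PySem.List.pyGet? (a :: b :: t) 0).getD 0
      - (PySem.List.pyGet? (a :: b :: t) 1).getD 0 > 0) = decide (a - b > 0) := by
    rw [PySem.List.pyGet?_zero, show (1 : Int) = ((1 : Nat) : Int) by norm_num,
      PySem.List.pyGet?_natCast]
    simp
  rw [hcs]
  have hstep : ∀ k : Nat,
      pvStep (decide (a - b > 0))
        ((PySem.List.pyGet? (a :: b :: t) (k : Int)).getD 0
          - (PySem.List.pyGet? (a :: b :: t) ((k : Int) + 1)).getD 0)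
      = pvStep (decide (a - b > 0))
        (((a :: b :: t)[k]?).getD 0 - ((a :: b :: t)[k + 1]?).getD 0) := by
    intro k
    rw [show ((k : Int) + 1) = ((k + 1 : Nat) : Int) by push_cast; ring,
      PySem.List.pyGet?_natCast, PySem.List.pyGet?_natCast]
  rw [funext hstep, pvRange_all_diffs]
  have hd : pvDiffs (a :: b :: t) = (a - b) :: pvDiffs (b :: t) := rfl
  have hB : ((a :: b :: t).zip (a :: b :: t).tail).map (fun p => p.1 - p.2)
      = pvDiffs (a :: b :: t) := rfl
  rw [hB]
  by_cases hs : a - b > 0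
  · rw [show decide (a - b > 0) = true by simpa using hs]
    rw [funext pvStep_pos]
    rw [hd]
    simp only [List.all_cons]
    rw [show decide (-3 ≤ a - b ∧ a - b ≤ -1) = false by simp; omega]
    simp
  · rw [show decide (a - b > 0) = false by simpa using hs]
    rw [funext pvStep_neg]
    rw [hd]
    simp only [List.all_cons]
    rw [show decide (1 ≤ a - b ∧ a - b ≤ 3) = false by simp; omega]
    simp

-- ===== VERDICT (by name: the statement is the Claim_ definition above) =====
theorem subtract_and_check_spec : Claim_equal_subtract_and_check := by
  intro xs _ hpre
  unfold Spec_subtract_and_check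
  match xs, hpre with
  | a :: b :: t, _ => exact pv_main a b t
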